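-- pv_equiv track=rewrite | github.com/geertj/draco2 | draco2/util/html.py | unquote_html
-- ===== SOURCE A (Python) =====
-- html_decode =  { 'lt': '<', 'gt': '>', 'amp': '&', 'quot': '"', 'apos': "'" }
--
-- def unquote_html(s):
--     """
--     Unquote SGML entities with their ASCII representation.
--     """
--     lst = s.split('&')
--     res = [lst[0]]
--     for s in lst[1:]:
--         p1 = s.find(';')
--         if p1 != -1:
--             try:
--                 res.append(html_decode[s[:p1]])
--                 res.append(s[p1+1:])
--             except KeyError:
--                 res.append('&' + s)
--         else:
--             res.append('&' + s)
--     return ''.join(res)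
-- ===== SOURCE B (Python) =====
-- html_decode = {'lt': '<', 'gt': '>', 'amp': '&', 'quot': '"', 'apos': "'"}
--
-- def unquote_html(s):
--     """
--     Unquote SGML entities with their ASCII representation.
--     """
--     out = []
--     i = 0
--     n = len(s)
--     while i < n:
--         c = s[i]
--         if c == '&':
--             j = i + 1
--             while j < n and s[j] != ';' and s[j] != '&':
--                 j += 1
--             if j < n and s[j] == ';' and s[i+1:j] in html_decode:
--                 out.append(html_decode[s[i+1:j]])
--                 i = j + 1
--                 continue
--         out.append(c)
--         i += 1
--     return ''.join(out)
-- ===== Notes on version B (the rewrite author's own statement) =====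
-- stated objective: simpler
-- what changed: A splits the string at every ampersand, post-processes each piece with find/dict-lookup and joins a built-up list of fragments; B makes one direct left-to-right scan over the characters, decoding an entity in place when the scan after an ampersand reaches a semicolon whose preceding name is in html_decode, with no intermediate list of pieces.
import Mathlib
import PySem

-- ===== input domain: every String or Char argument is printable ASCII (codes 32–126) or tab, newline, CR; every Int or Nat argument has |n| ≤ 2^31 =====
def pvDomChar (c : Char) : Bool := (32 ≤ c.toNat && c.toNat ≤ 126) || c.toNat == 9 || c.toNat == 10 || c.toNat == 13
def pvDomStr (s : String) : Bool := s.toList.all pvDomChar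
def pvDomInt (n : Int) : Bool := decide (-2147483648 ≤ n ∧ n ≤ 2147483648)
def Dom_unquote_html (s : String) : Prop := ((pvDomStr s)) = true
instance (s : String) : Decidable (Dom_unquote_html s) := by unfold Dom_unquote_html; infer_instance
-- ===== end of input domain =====

-- B replaces A's split('&')/find/join pipeline by one direct left-to-right scan of the
-- characters (objective: simpler single-pass decomposition, no intermediate lists of pieces).

-- the module constant html_decode, shared verbatim by both Pythons
def pvDecode : PySem.Dict (List Char) (List Char) :=
  PySem.Dict.ofList [("lt".toList, "<".toList), ("gt".toList, ">".toList), ("amp".toList, "&".toList),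
   ("quot".toList, "\"".toList), ("apos".toList, "'".toList)]

-- ===== PORT A =====
-- literal port of A: split on '&', keep piece 0, decode each later piece at its first ';'
-- (lst[0] is `headI`: str.split never returns an empty list, so the Python indexing cannot fail)
def unquote_html (s : String) : String :=
  let lst := PySem.Chars.splitOn s.toList ['&']
  let res : List (List Char) := [lst.headI]
  let res := (PySem.List.slice lst (some 1) none).foldl (fun res t =>
    let p1 := PySem.Chars.find t [';']
    if p1 ≠ -1 then
      match PySem.Dict.get? pvDecode (PySem.Chars.slice t none (some p1)) with
      | some d => res ++ [d, PySem.Chars.slice t (some (p1 + 1)) none]   -- res.append twice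
      | none => res ++ ['&' :: t]                                        -- KeyError branch
    else res ++ ['&' :: t]) res
  String.ofList (PySem.Chars.join [] res)

-- ===== PORT B =====
-- B's inner while loop: scan forward from the char after '&'; `some (name, rest)` iff the
-- scan stops at a ';' (name = chars before it, rest = chars after it), `none` otherwise
def pvScan : List Char → Option (List Char × List Char)
  | [] => none
  | c :: cs =>
    if c = ';' then some ([], cs)
    else if c = '&' then none
    else (pvScan cs).map (fun p => (c :: p.1, p.2))

theorem pvScan_length : ∀ {cs : List Char} {nm rest : List Char},
    pvScan cs = some (nm, rest) → rest.length < cs.length := by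
  intro cs
  induction cs with
  | nil => intro nm rest h; simp [pvScan] at h
  | cons c cs ih =>
    intro nm rest h
    simp only [pvScan] at h
    split at h
    · simp only [Option.some.injEq, Prod.mk.injEq] at h
      simp [← h.2]
    · split at h
      · simp at h
      · rcases Option.map_eq_some_iff.mp h with ⟨⟨nm', rest'⟩, hp, he⟩
        simp only [Prod.mk.injEq] at he
        have := ih hp
        simp [← he.2]
        omega

-- B's outer while loop, one pass over the characters
def pvAltGo (l : List Char) : List Char :=
  match l with
  | [] => []
  | c :: cs =>
    if c = '&' then
      match h : pvScan cs with
      | some (nm, rest) =>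
        match PySem.Dict.get? pvDecode nm with
        | some d => d ++ pvAltGo rest
        | none => c :: pvAltGo cs
      | none => c :: pvAltGo cs
    else c :: pvAltGo cs
termination_by l.length
decreasing_by
  · exact Nat.lt_succ_of_lt (pvScan_length h)
  · exact Nat.lt_succ_self _
  · exact Nat.lt_succ_self _
  · exact Nat.lt_succ_self _

def unquote_html_alt (s : String) : String := String.ofList (pvAltGo s.toList)

-- ===== PRECONDITION & SPEC =====
def Spec_unquote_html (s : String) (out : String) : Prop := out = unquote_html_alt s
instance (s : String) (out : String) : Decidable (Spec_unquote_html s out) := by unfold Spec_unquote_html; infer_instance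

-- ===== CLAIM (what is proved, stated in full; the proofs are below) =====
def Claim_equal_unquote_html : Prop := ∀ (s : String), Dom_unquote_html s → Spec_unquote_html s (unquote_html s)

-- ===== LEMMAS AND PROOFS =====

-- the two pieces A appends for one '&'-segment t, and their concatenation
def gSeg (t : List Char) : List (List Char) :=
  let p1 := PySem.Chars.find t [';']
  if p1 ≠ -1 then
    match PySem.Dict.get? pvDecode (PySem.Chars.slice t none (some p1)) with
    | some d => [d, PySem.Chars.slice t (some (p1 + 1)) none]
    | none => ['&' :: t]
  else ['&' :: t]

def segOut (t : List Char) : List Char := (gSeg t).flatten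

-- pvAltGo equations
theorem altGo_nil : pvAltGo [] = [] := by simp [pvAltGo]

theorem altGo_cons_ne {c : Char} {cs : List Char} (h : c ≠ '&') :
    pvAltGo (c :: cs) = c :: pvAltGo cs := by
  rw [pvAltGo]; simp [h]

theorem altGo_amp_none {cs : List Char} (h : pvScan cs = none) :
    pvAltGo ('&' :: cs) = '&' :: pvAltGo cs := by
  rw [pvAltGo, if_pos rfl]
  split
  · rename_i heq; rw [h] at heq; cases heq
  · rfl

theorem altGo_amp_some_some {cs nm rest d : List Char}
    (h1 : pvScan cs = some (nm, rest)) (h2 : PySem.Dict.get? pvDecode nm = some d) :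
    pvAltGo ('&' :: cs) = d ++ pvAltGo rest := by
  rw [pvAltGo, if_pos rfl]
  split
  · rename_i nm' rest' heq
    rw [h1] at heq
    cases heq
    rw [h2]
  · rename_i heq; simp [h1] at heq

theorem altGo_amp_some_none {cs nm rest : List Char}
    (h1 : pvScan cs = some (nm, rest)) (h2 : PySem.Dict.get? pvDecode nm = none) :
    pvAltGo ('&' :: cs) = '&' :: pvAltGo cs := by
  rw [pvAltGo, if_pos rfl]
  split
  · rename_i nm' rest' heq
    rw [h1] at heq
    cases heq
    rw [h2]
  · rename_i heq; simp [h1] at heq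

theorem altGo_append {p : List Char} (x : List Char) (h : '&' ∉ p) :
    pvAltGo (p ++ x) = p ++ pvAltGo x := by
  induction p with
  | nil => rfl
  | cons c p ih =>
    simp only [List.mem_cons, not_or] at h
    rw [List.cons_append, altGo_cons_ne (Ne.symm h.1), ih h.2, List.cons_append]

theorem altGo_pure {l : List Char} (h : '&' ∉ l) : pvAltGo l = l := by
  have := altGo_append (p := l) [] h
  simpa [altGo_nil] using this

-- pvScan characterizations
theorem pvScan_semi {nm : List Char} (u : List Char) (h1 : ';' ∉ nm) (h2 : '&' ∉ nm) :
    pvScan (nm ++ ';' :: u) = some (nm, u) := by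
  induction nm with
  | nil => simp [pvScan]
  | cons c nm ih =>
    simp only [List.mem_cons, not_or] at h1 h2
    rw [List.cons_append, pvScan]
    simp [Ne.symm h1.1, Ne.symm h2.1, ih h1.2 h2.2]

theorem pvScan_none_nil {t : List Char} (h1 : ';' ∉ t) (h2 : '&' ∉ t) :
    pvScan t = none := by
  induction t with
  | nil => simp [pvScan]
  | cons c t ih =>
    simp only [List.mem_cons, not_or] at h1 h2
    rw [pvScan]
    simp [Ne.symm h1.1, Ne.symm h2.1, ih h1.2 h2.2]

theorem pvScan_none_amp {t : List Char} (r : List Char) (h1 : ';' ∉ t) (h2 : '&' ∉ t) :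
    pvScan (t ++ '&' :: r) = none := by
  induction t with
  | nil => simp [pvScan]
  | cons c t ih =>
    simp only [List.mem_cons, not_or] at h1 h2
    rw [List.cons_append, pvScan]
    simp [Ne.symm h1.1, Ne.symm h2.1, ih h1.2 h2.2]

-- Chars.find on the one-char pattern [';']
theorem singleton_prefix {c : Char} {l : List Char} : [c] <+: l ↔ l.head? = some c := by
  cases l with
  | nil => simp
  | cons d t => simp [List.cons_prefix_cons, eq_comm]

theorem find_no {t : List Char} (h : ';' ∉ t) : PySem.Chars.find t [';'] = -1 := by
  rw [PySem.Chars.find_eq_neg_one_iff]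
  intro hin
  exact h (hin.subset (by simp))

theorem find_semi {nm : List Char} (u : List Char) (h : ';' ∉ nm) :
    PySem.Chars.find (nm ++ ';' :: u) [';'] = (nm.length : Int) := by
  set t := nm ++ ';' :: u with ht
  have hinf : [';'] <:+: t := by
    refine List.infix_iff_prefix_suffix.mpr ⟨';' :: u, by simp, by simp [ht]⟩
  have hnn : 0 ≤ PySem.Chars.find t [';'] := (PySem.Chars.find_nonneg_iff t [';']).mpr hinf
  obtain ⟨hpf, hmin⟩ := PySem.Chars.find_spec hnn
  set k := (PySem.Chars.find t [';']).toNat with hk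
  have hkle : k ≤ nm.length := by
    by_contra hgt
    rw [not_le] at hgt
    exact hmin nm.length hgt (by rw [ht, List.drop_left]; exact singleton_prefix.mpr rfl)
  have : ¬ k < nm.length := by
    intro hlt
    have hh := singleton_prefix.mp hpf
    rw [List.head?_drop] at hh
    have : t[k]? = nm[k]? := by
      rw [ht]; exact List.getElem?_append_left hlt
    rw [this] at hh
    exact h (List.mem_of_getElem? hh)
  have hkeq : k = nm.length := by omega
  omega

-- splitOn on a one-char separator, via its fueled worker `go`
theorem go_zero (sep cur l : List Char) (acc : List (List Char)) :
    PySem.Chars.splitOn.go sep 0 l cur acc = ((cur.reverse ++ l) :: acc).reverse := by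
  rw [PySem.Chars.splitOn.go]

theorem go_nil (sep cur : List Char) (acc : List (List Char)) (f : Nat) :
    PySem.Chars.splitOn.go sep (f+1) [] cur acc = (cur.reverse :: acc).reverse := by
  rw [PySem.Chars.splitOn.go]; simp

theorem go_cons (sep cur : List Char) (acc : List (List Char)) (c : Char) (rest : List Char) (f : Nat) :
    PySem.Chars.splitOn.go sep (f+1) (c :: rest) cur acc =
      if sep.isPrefixOf (c :: rest) then PySem.Chars.splitOn.go sep f (List.drop sep.length (c :: rest)) [] (cur.reverse :: acc)
      else PySem.Chars.splitOn.go sep f rest (c :: cur) acc := by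
  rw [PySem.Chars.splitOn.go]

theorem go_cons_eq (x cur : _) (acc : List (List Char)) (rest : List Char) (f : Nat) :
    PySem.Chars.splitOn.go [x] (f+1) (x :: rest) cur acc =
      PySem.Chars.splitOn.go [x] f rest [] (cur.reverse :: acc) := by
  rw [go_cons]; simp [List.isPrefixOf]

theorem go_cons_ne (x c : Char) (cur : List Char) (acc : List (List Char)) (rest : List Char) (f : Nat)
    (h : x ≠ c) :
    PySem.Chars.splitOn.go [x] (f+1) (c :: rest) cur acc =
      PySem.Chars.splitOn.go [x] f rest (c :: cur) acc := by
  rw [go_cons]; simp [List.isPrefixOf, h]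

theorem go_congr (x : Char) : ∀ (f1 : Nat) (f2 : Nat) (l cur : List Char) (acc : List (List Char)),
    l.length < f1 → l.length < f2 →
    PySem.Chars.splitOn.go [x] f1 l cur acc = PySem.Chars.splitOn.go [x] f2 l cur acc := by
  intro f1
  induction f1 with
  | zero => intro f2 l cur acc h1; omega
  | succ f1 ih =>
    intro f2 l cur acc h1 h2
    cases l with
    | nil =>
      cases f2 with
      | zero => omega
      | succ f2 => rw [go_nil, go_nil]
    | cons c rest =>
      cases f2 with
      | zero => omega
      | succ f2 =>
        by_cases hx : x = c
        · subst hx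
          rw [go_cons_eq, go_cons_eq]
          exact ih f2 rest [] _ (by simp at h1 ⊢; omega) (by simp at h2 ⊢; omega)
        · rw [go_cons_ne _ _ _ _ _ _ hx, go_cons_ne _ _ _ _ _ _ hx]
          exact ih f2 rest _ _ (by simp at h1 ⊢; omega) (by simp at h2 ⊢; omega)

theorem go_acc (x : Char) : ∀ (f : Nat) (l cur : List Char) (acc : List (List Char)),
    PySem.Chars.splitOn.go [x] f l cur acc =
      acc.reverse ++ PySem.Chars.splitOn.go [x] f l cur [] := by
  intro f
  induction f with
  | zero => intro l cur acc; rw [go_zero, go_zero]; simp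
  | succ f ih =>
    intro l cur acc
    cases l with
    | nil => rw [go_nil, go_nil]; simp
    | cons c rest =>
      by_cases hx : x = c
      · subst hx
        rw [go_cons_eq, go_cons_eq, ih rest [] (cur.reverse :: acc), ih rest [] [cur.reverse]]
        simp
      · rw [go_cons_ne _ _ _ _ _ _ hx, go_cons_ne _ _ _ _ _ _ hx, ih rest _ acc]

theorem go_no (x : Char) : ∀ (l : List Char) (f : Nat) (cur : List Char) (acc : List (List Char)),
    l.length < f → x ∉ l →
    PySem.Chars.splitOn.go [x] f l cur acc = ((cur.reverse ++ l) :: acc).reverse := by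
  intro l
  induction l with
  | nil =>
    intro f cur acc h1 h2
    cases f with
    | zero => omega
    | succ f => rw [go_nil]; simp
  | cons c rest ih =>
    intro f cur acc h1 h2
    simp only [List.mem_cons, not_or] at h2
    cases f with
    | zero => omega
    | succ f =>
      rw [go_cons_ne _ _ _ _ _ _ h2.1, ih f (c :: cur) acc (by simp at h1 ⊢; omega) h2.2]
      simp

theorem go_pre (x : Char) : ∀ (a : List Char) (f : Nat) (r cur : List Char) (acc : List (List Char)),
    x ∉ a → (a ++ x :: r).length < f →
    PySem.Chars.splitOn.go [x] f (a ++ x :: r) cur acc =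
      PySem.Chars.splitOn.go [x] (r.length + 1) r [] ((cur.reverse ++ a) :: acc) := by
  intro a
  induction a with
  | nil =>
    intro f r cur acc _ hf
    cases f with
    | zero => simp at hf
    | succ f =>
      rw [List.nil_append, go_cons_eq]
      rw [go_congr x f (r.length + 1) r [] _ (by simp at hf; omega) (by omega)]
      simp
  | cons c a ih =>
    intro f r cur acc ha hf
    simp only [List.mem_cons, not_or] at ha
    cases f with
    | zero => simp at hf
    | succ f =>
      rw [List.cons_append, go_cons_ne _ _ _ _ _ _ ha.1,
        ih f r (c :: cur) acc ha.2 (by simp at hf ⊢; omega)]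
      simp

theorem splitOn_no {c : Char} {l : List Char} (h : c ∉ l) :
    PySem.Chars.splitOn l [c] = [l] := by
  rw [PySem.Chars.splitOn, go_no c l (l.length + 1) [] [] (by omega) h]
  simp

theorem splitOn_cons {c : Char} {a : List Char} (r : List Char) (h : c ∉ a) :
    PySem.Chars.splitOn (a ++ c :: r) [c] = a :: PySem.Chars.splitOn r [c] := by
  rw [PySem.Chars.splitOn, go_pre c a ((a ++ c :: r).length + 1) r [] [] h (by omega)]
  simp only [List.reverse_nil, List.nil_append]
  rw [go_acc c (r.length + 1) r [] [a], PySem.Chars.splitOn]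
  simp

-- segOut characterizations
theorem segOut_no {t : List Char} (h : ';' ∉ t) : segOut t = '&' :: t := by
  simp [segOut, gSeg, find_no h]

theorem segOut_semi {nm : List Char} (u : List Char) (h : ';' ∉ nm) :
    segOut (nm ++ ';' :: u) =
      (match PySem.Dict.get? pvDecode nm with
       | some d => d ++ u
       | none => '&' :: (nm ++ ';' :: u)) := by
  have hf := find_semi u h
  have htake : PySem.Chars.slice (nm ++ ';' :: u) none (some (nm.length : Int)) = nm := by
    simp [PySem.List.slice_to_natCast]
  have hdrop : PySem.Chars.slice (nm ++ ';' :: u) (some ((nm.length : Int) + 1)) none = u := by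
    have : ((nm.length : Int) + 1) = ((nm.length + 1 : Nat) : Int) := by push_cast; ring
    rw [this]
    have : (nm ++ ';' :: u) = (nm ++ [';']) ++ u := by simp
    simp only [PySem.Chars.slice_eq_listSlice, PySem.List.slice_from_natCast, this]
    have hl : nm.length + 1 = (nm ++ [';']).length := by simp
    rw [hl, List.drop_left]
  simp only [segOut, gSeg, hf, htake, hdrop]
  cases PySem.Dict.get? pvDecode nm <;> simp

-- flatten distributes over flatMap
theorem flatten_flatMap {α : Type} (l : List (List α)) (g : List α → List (List α)) :
    (l.flatMap g).flatten = l.flatMap (fun t => (g t).flatten) := by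
  induction l with
  | nil => simp
  | cons t l ih => simp [List.flatMap_cons, ih]

-- join with the empty separator is flatten
theorem join_nil_flatten (parts : List (List Char)) :
    PySem.Chars.join [] parts = parts.flatten := by
  simp only [PySem.Chars.join, List.intercalate]
  induction parts with
  | nil => rfl
  | cons p parts ih =>
    cases parts with
    | nil => simp
    | cons q parts => simpa [List.intersperse] using ih

-- A unfolded to headI/flatMap form
theorem A_eq (s : String) :
    unquote_html s = String.ofList ((PySem.Chars.splitOn s.toList ['&']).headI ++
      ((PySem.Chars.splitOn s.toList ['&']).drop 1).flatMap segOut) := by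
  unfold unquote_html
  dsimp only []
  rw [PySem.List.slice_from_one]
  have hbody : (fun (res : List (List Char)) (t : List Char) =>
      let p1 := PySem.Chars.find t [';']
      if p1 ≠ -1 then
        match PySem.Dict.get? pvDecode (PySem.Chars.slice t none (some p1)) with
        | some d => res ++ [d, PySem.Chars.slice t (some (p1 + 1)) none]
        | none => res ++ ['&' :: t]
      else res ++ ['&' :: t]) = fun res t => res ++ gSeg t := by
    funext res t
    simp only [gSeg]
    split
    · split <;> rfl
    · rfl
  rw [hbody, PySem.List.foldl_append_eq_flatMap, join_nil_flatten]
  congr 1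
  rw [List.flatten_append, flatten_flatMap]
  simp [← List.drop_one]
  rfl

-- main induction: B on '&' :: r equals A's treatment of the segments of r
theorem amp_eq : ∀ (n : Nat) (r : List Char), r.length ≤ n →
    pvAltGo ('&' :: r) = ((PySem.Chars.splitOn r ['&']).flatMap segOut) := by
  intro n
  induction n with
  | zero =>
    intro r hr
    have hr0 : r = [] := List.length_eq_zero_iff.mp (by omega)
    subst hr0
    rw [splitOn_no (by simp), altGo_amp_none (by simp [pvScan]), altGo_nil]
    simp only [List.flatMap_cons, List.flatMap_nil, List.append_nil]
    rw [segOut_no (by simp)]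
  | succ n ih =>
    intro r hr
    by_cases hamp : '&' ∈ r
    · obtain ⟨t, r', rfl, ht⟩ := List.eq_append_cons_of_mem hamp
      have hr' : r'.length ≤ n := by simp at hr; omega
      rw [splitOn_cons r' ht]
      by_cases hsemi : ';' ∈ t
      · obtain ⟨nm, u, rfl, hnm⟩ := List.eq_append_cons_of_mem hsemi
        have hnm_amp : '&' ∉ nm := fun hx => ht (by simp [hx])
        have hu_amp : '&' ∉ u := fun hx => ht (by simp [hx])
        have hscan : pvScan ((nm ++ ';' :: u) ++ '&' :: r') = some (nm, u ++ '&' :: r') := by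
          rw [List.append_assoc, List.cons_append]
          exact pvScan_semi _ hnm hnm_amp
        cases hd : PySem.Dict.get? pvDecode nm with
        | some d =>
          rw [altGo_amp_some_some hscan hd, altGo_append ('&' :: r') hu_amp, ih r' hr']
          simp [segOut_semi u hnm, hd]
        | none =>
          rw [altGo_amp_some_none hscan hd, altGo_append ('&' :: r') ht, ih r' hr']
          simp [segOut_semi u hnm, hd]
      · have hscan : pvScan (t ++ '&' :: r') = none := pvScan_none_amp r' hsemi ht
        rw [altGo_amp_none hscan, altGo_append ('&' :: r') ht, ih r' hr']
        simp [segOut_no hsemi]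
    · rw [splitOn_no hamp]
      by_cases hsemi : ';' ∈ r
      · obtain ⟨nm, u, rfl, hnm⟩ := List.eq_append_cons_of_mem hsemi
        have hnm_amp : '&' ∉ nm := fun hx => hamp (by simp [hx])
        have hu_amp : '&' ∉ u := fun hx => hamp (by simp [hx])
        have hscan : pvScan (nm ++ ';' :: u) = some (nm, u) := pvScan_semi u hnm hnm_amp
        cases hd : PySem.Dict.get? pvDecode nm with
        | some d =>
          rw [altGo_amp_some_some hscan hd, altGo_pure hu_amp]
          simp [segOut_semi u hnm, hd]
        | none =>
          rw [altGo_amp_some_none hscan hd, altGo_pure hamp]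
          simp [segOut_semi u hnm, hd]
      · have hscan : pvScan r = none := pvScan_none_nil hsemi hamp
        rw [altGo_amp_none hscan, altGo_pure hamp]
        simp [segOut_no hsemi]

theorem main_eq (l : List Char) :
    pvAltGo l = (PySem.Chars.splitOn l ['&']).headI ++
      ((PySem.Chars.splitOn l ['&']).drop 1).flatMap segOut := by
  by_cases h : '&' ∈ l
  · obtain ⟨a, r, rfl, ha⟩ := List.eq_append_cons_of_mem h
    rw [splitOn_cons r ha, altGo_append ('&' :: r) ha, amp_eq r.length r le_rfl]
    simp
  · rw [splitOn_no h, altGo_pure h]; simp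

-- ===== VERDICT (by name: the statement is the Claim_ definition above) =====
theorem unquote_html_spec : Claim_equal_unquote_html := by
  intro s _
  unfold Spec_unquote_html unquote_html_alt
  rw [A_eq, main_eq]
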